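-- pv_equiv track=rewrite | github.com/FranchiseIQ/WebApp | data/database/db_manager.py | _categorize_brand
-- ===== SOURCE A (Python) =====
-- def _categorize_brand(ticker: str) -> str:
--     """Categorize a brand based on ticker."""
--     categories = {
--         'QSR': ['MCD', 'WEN', 'YUM', 'QSR', 'JACK', 'SHAK', 'WING', 'CFA', 'SUB', 'DQ', 'FIVE', 'CANE', 'WHATA', 'ZAX', 'BO', 'INNOUT'],
--         'Pizza': ['DPZ', 'PZZA'],
--         'Cafe': ['SBUX', 'DNUT', 'DUTCH'],
--         'Fast Casual': ['CMG', 'PANERA', 'JM', 'PANDA'],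
--         'Casual Dining': ['DIN', 'DENN', 'CBRL', 'TXRH', 'BLMN', 'CAKE', 'BJRI', 'CHUY', 'EAT', 'DRI', 'RRGB', 'PLAY', 'NATH'],
--         'Hotel': ['MAR', 'HLT', 'H', 'IHG', 'WH', 'CHH', 'BW', 'G6', 'VAC', 'TNL'],
--         'Fitness': ['PLNT', 'XPOF'],
--         'Auto': ['DRVN', 'HLE', 'CAR', 'MCW', 'UHAL'],
--         'Services': ['HRB', 'SERV', 'ROL'],
--         'Convenience': ['WAWA', 'SHEETZ'],
--         'Conglomerate': ['INSPIRE', 'FOCUS', 'DRIVEN', 'ROARK']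
--     }
--
--     for category, tickers in categories.items():
--         if ticker in tickers:
--             return category
--     return 'Other'
-- ===== SOURCE B (Python) =====
-- # Compact table: each category carries its tickers as one space-separated string.
-- _TABLE = (
--     ('QSR', 'MCD WEN YUM QSR JACK SHAK WING CFA SUB DQ FIVE CANE WHATA ZAX BO INNOUT'),
--     ('Pizza', 'DPZ PZZA'),
--     ('Cafe', 'SBUX DNUT DUTCH'),
--     ('Fast Casual', 'CMG PANERA JM PANDA'),
--     ('Casual Dining', 'DIN DENN CBRL TXRH BLMN CAKE BJRI CHUY EAT DRI RRGB PLAY NATH'),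
--     ('Hotel', 'MAR HLT H IHG WH CHH BW G6 VAC TNL'),
--     ('Fitness', 'PLNT XPOF'),
--     ('Auto', 'DRVN HLE CAR MCW UHAL'),
--     ('Services', 'HRB SERV ROL'),
--     ('Convenience', 'WAWA SHEETZ'),
--     ('Conglomerate', 'INSPIRE FOCUS DRIVEN ROARK'),
-- )
--
-- # Reverse index built once at import: ticker -> category (tickers are unique).
-- _TICKER_TO_CATEGORY = {t: c for c, ts in _TABLE for t in ts.split()}
--
--
-- def _categorize_brand(ticker: str) -> str:
--     """Categorize a brand based on ticker."""
--     return _TICKER_TO_CATEGORY.get(ticker, 'Other')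
-- ===== Notes on version B (the rewrite author's own statement) =====
-- stated objective: simpler
-- what changed: A's per-call nested scan over category lists is replaced by a compact space-separated-string table that is split once at import into a reverse ticker-to-category dict, so the function body collapses to a single dict lookup with default 'Other'.
import Mathlib
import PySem

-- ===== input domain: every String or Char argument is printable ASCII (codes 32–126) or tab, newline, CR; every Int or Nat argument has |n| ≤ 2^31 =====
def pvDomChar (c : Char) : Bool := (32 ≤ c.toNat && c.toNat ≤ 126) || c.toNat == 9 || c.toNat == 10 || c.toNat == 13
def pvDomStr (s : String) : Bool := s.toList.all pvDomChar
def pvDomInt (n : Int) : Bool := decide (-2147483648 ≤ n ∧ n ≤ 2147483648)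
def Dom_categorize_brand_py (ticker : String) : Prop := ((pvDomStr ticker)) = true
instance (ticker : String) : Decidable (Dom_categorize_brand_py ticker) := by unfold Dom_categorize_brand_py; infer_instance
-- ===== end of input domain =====

-- B replaces A's per-call scan over category lists by a compact space-separated table
-- split once into a reverse ticker→category dict; the body is one lookup (simpler).

-- ===== PORT A =====
-- the `categories` dict literal of A, in insertion order
def pvCatsA : List (String × List String) :=
  [("QSR", ["MCD", "WEN", "YUM", "QSR", "JACK", "SHAK", "WING", "CFA", "SUB", "DQ", "FIVE", "CANE", "WHATA", "ZAX", "BO", "INNOUT"]),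
   ("Pizza", ["DPZ", "PZZA"]),
   ("Cafe", ["SBUX", "DNUT", "DUTCH"]),
   ("Fast Casual", ["CMG", "PANERA", "JM", "PANDA"]),
   ("Casual Dining", ["DIN", "DENN", "CBRL", "TXRH", "BLMN", "CAKE", "BJRI", "CHUY", "EAT", "DRI", "RRGB", "PLAY", "NATH"]),
   ("Hotel", ["MAR", "HLT", "H", "IHG", "WH", "CHH", "BW", "G6", "VAC", "TNL"]),
   ("Fitness", ["PLNT", "XPOF"]),
   ("Auto", ["DRVN", "HLE", "CAR", "MCW", "UHAL"]),
   ("Services", ["HRB", "SERV", "ROL"]),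
   ("Convenience", ["WAWA", "SHEETZ"]),
   ("Conglomerate", ["INSPIRE", "FOCUS", "DRIVEN", "ROARK"])]

-- `for category, tickers in categories.items(): if ticker in tickers: return category` / `return 'Other'`
def pvScanA (ticker : String) : List (String × List String) → String
  | [] => "Other"
  | (category, tickers) :: rest =>
      if tickers.contains ticker then category else pvScanA ticker rest

def categorize_brand_py (ticker : String) : String := pvScanA ticker pvCatsA

-- ===== PORT B =====
-- Source B's `_TABLE` tuple: each category with its tickers as one space-separated string
def pvTable : List (String × String) :=
  [("QSR", "MCD WEN YUM QSR JACK SHAK WING CFA SUB DQ FIVE CANE WHATA ZAX BO INNOUT"),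
   ("Pizza", "DPZ PZZA"),
   ("Cafe", "SBUX DNUT DUTCH"),
   ("Fast Casual", "CMG PANERA JM PANDA"),
   ("Casual Dining", "DIN DENN CBRL TXRH BLMN CAKE BJRI CHUY EAT DRI RRGB PLAY NATH"),
   ("Hotel", "MAR HLT H IHG WH CHH BW G6 VAC TNL"),
   ("Fitness", "PLNT XPOF"),
   ("Auto", "DRVN HLE CAR MCW UHAL"),
   ("Services", "HRB SERV ROL"),
   ("Convenience", "WAWA SHEETZ"),
   ("Conglomerate", "INSPIRE FOCUS DRIVEN ROARK")]

-- `_TICKER_TO_CATEGORY = {t: c for c, ts in _TABLE for t in ts.split()}`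
def pvTickerToCategory : PySem.Dict String String :=
  pvTable.foldl (fun d p => (PySem.Str.split₀ p.2).foldl (fun d t => d.insert t p.1) d)
    PySem.Dict.empty

-- `return _TICKER_TO_CATEGORY.get(ticker, 'Other')`
def categorize_brand_py_alt (ticker : String) : String :=
  pvTickerToCategory.getD ticker "Other"

-- ===== PRECONDITION & SPEC =====
def Spec_categorize_brand_py (ticker : String) (out : String) : Prop := out = categorize_brand_py_alt ticker
instance (ticker : String) (out : String) : Decidable (Spec_categorize_brand_py ticker out) := by unfold Spec_categorize_brand_py; infer_instance

-- ===== CLAIM (what is proved, stated in full; the proofs are below) =====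
def Claim_equal_categorize_brand_py : Prop := ∀ (ticker : String), Dom_categorize_brand_py ticker → Spec_categorize_brand_py ticker (categorize_brand_py ticker)

-- ===== LEMMAS AND PROOFS =====

-- B's reverse dict, evaluated: it is exactly the flat association list of A's table.
theorem pvDict_eq :
    pvTickerToCategory =
      PySem.Dict.mk (pvCatsA.flatMap fun p => p.2.map fun t => (t, p.1)) := by
  set_option maxRecDepth 8192 in decide

-- Lookup in one category's block of the flat list = membership test in that category's list.
theorem pvLookup_block (t c : String) (ts : List String) (rest : List (String × String)) :
    (PySem.Dict.mk (ts.map (fun x => (x, c)) ++ rest)).getD t "Other" =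
      if ts.contains t then c else (PySem.Dict.mk rest).getD t "Other" := by
  induction ts with
  | nil => simp
  | cons x xs ih =>
      simp only [List.map_cons, List.cons_append, PySem.Dict.getD_eq_get?_getD,
        PySem.Dict.get?_mk_cons, List.contains_cons] at *
      by_cases h : x = t
      · simp [h]
      · have h' : (x == t) = false := by simp [h]
        have h'' : (t == x) = false := by simp [Ne.symm h]
        simp [h', h'', ih]

-- Lookup in the whole flat list = A's first-match scan over the categories.
theorem pvLookup_flat (t : String) (cats : List (String × List String)) :
    (PySem.Dict.mk (cats.flatMap fun p => p.2.map fun x => (x, p.1))).getD t "Other" =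
      pvScanA t cats := by
  induction cats with
  | nil => simp [pvScanA, PySem.Dict.getD_eq_get?_getD, PySem.Dict.get?]
  | cons p rest ih =>
      simp only [List.flatMap_cons, pvScanA, pvLookup_block, ih]

-- ===== VERDICT (by name: the statement is the Claim_ definition above) =====
theorem categorize_brand_py_spec : Claim_equal_categorize_brand_py := by
  intro ticker _
  unfold Spec_categorize_brand_py categorize_brand_py categorize_brand_py_alt
  rw [pvDict_eq, pvLookup_flat]
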